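-- pv_equiv track=rewrite | github.com/TomaszWs/Codewars | 6kyu/Setting-Places-for-the-Dead.py | get_corner
-- ===== SOURCE A (Python) =====
-- def get_corner(name):
--     name_corners = {
--         'Earthenware': 'QUTHCRDMZ',
--         'Waterfall': 'WEVOXING',
--         'Fireplace': 'JFABKPLY',
--         'Windowsill': 'S'
--     }
--     corners_map = {
--         'Earthenware': 0,
--         'Waterfall': 3,
--         'Fireplace': 6,
--         'Windowsill': 9
--     }
--     first_letter = name[0]
--     for key, value in name_corners.items():
--         if first_letter in value:
--             return corners_map[key]
--     return
-- ===== SOURCE B (Python) =====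
-- def get_corner(name):
--     # single scan-free lookup: position in one concatenated string, then arithmetic
--     pos = 'QUTHCRDMZWEVOXINGJFABKPLYS'.find(name[0])
--     if pos < 0:
--         return None
--     return 3 * ((pos >= 9) + (pos >= 17) + (pos >= 25))
-- ===== Notes on version B (the rewrite author's own statement) =====
-- stated objective: simpler
-- what changed: Replaced the two parallel dicts and the items() loop with a single find on one concatenated letter string followed by threshold arithmetic (3 * number of group boundaries passed).
import Mathlib
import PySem

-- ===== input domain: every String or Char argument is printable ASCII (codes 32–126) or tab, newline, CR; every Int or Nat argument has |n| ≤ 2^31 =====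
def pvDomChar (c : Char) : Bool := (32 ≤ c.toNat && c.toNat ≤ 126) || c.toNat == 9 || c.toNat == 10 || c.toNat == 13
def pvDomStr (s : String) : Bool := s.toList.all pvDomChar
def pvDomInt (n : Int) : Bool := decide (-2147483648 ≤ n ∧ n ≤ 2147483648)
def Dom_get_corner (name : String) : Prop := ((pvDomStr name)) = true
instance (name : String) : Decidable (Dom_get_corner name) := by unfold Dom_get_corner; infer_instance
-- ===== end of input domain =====

-- B replaces A's two parallel dicts and the item loop by one find on a concatenated
-- letter string plus threshold arithmetic (objective: simpler). Both raise on name = "".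

-- ===== PORT A =====
-- the loop over name_corners.items(); corners_map[key] is ported as Dict.get?
-- (the key is always present, so the KeyError branch of get? is never taken)
def getCornerLoopA (corners_map : PySem.Dict String Int) (first_letter : Char) :
    List (String × String) → Option Int
  | [] => none
  | (key, value) :: rest =>
      if PySem.Str.isIn (String.ofList [first_letter]) value then corners_map.get? key
      else getCornerLoopA corners_map first_letter rest

def get_corner (name : String) : Option Int :=
  let name_corners : PySem.Dict String String :=
    ((((PySem.Dict.empty).insert "Earthenware" "QUTHCRDMZ").insert "Waterfall" "WEVOXING").insert
        "Fireplace" "JFABKPLY").insert "Windowsill" "S"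
  let corners_map : PySem.Dict String Int :=
    ((((PySem.Dict.empty).insert "Earthenware" 0).insert "Waterfall" 3).insert
        "Fireplace" 6).insert "Windowsill" 9
  match PySem.Str.pyGet? name 0 with
  | none => none  -- IndexError on empty name: excluded by Pre_
  | some first_letter => getCornerLoopA corners_map first_letter name_corners.items

-- ===== PORT B =====
def get_corner_alt (name : String) : Option Int :=
  match PySem.Str.pyGet? name 0 with
  | none => none  -- IndexError on empty name: excluded by Pre_
  | some c =>
      let pos := PySem.Str.find "QUTHCRDMZWEVOXINGJFABKPLYS" (String.ofList [c])
      if pos < 0 then none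
      else some (3 * ((if pos ≥ 9 then (1 : Int) else 0) +
                      (if pos ≥ 17 then 1 else 0) + (if pos ≥ 25 then 1 else 0)))

-- ===== PRECONDITION & SPEC =====
-- A raises IndexError on the empty string (name[0]); exactly that input is excluded.
def Pre_get_corner (name : String) : Prop := name ≠ ""
instance (name : String) : Decidable (Pre_get_corner name) := by unfold Pre_get_corner; infer_instance
def pvWitness_get_corner : String := "Quentin"

def Spec_get_corner (name : String) (out : Option Int) : Prop := out = get_corner_alt name
instance (name : String) (out : Option Int) : Decidable (Spec_get_corner name out) := by unfold Spec_get_corner; infer_instance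

-- ===== CLAIM (what is proved, stated in full; the proofs are below) =====
def Claim_equal_get_corner : Prop := ∀ (name : String), Dom_get_corner name → Pre_get_corner name → Spec_get_corner name (get_corner name)

-- ===== LEMMAS AND PROOFS =====

-- the two ports agree on every one-character string whose character is below code 128
set_option maxRecDepth 4096 in
lemma char_agree : ∀ n : Nat, n < 128 →
    get_corner (String.ofList [Char.ofNat n]) = get_corner_alt (String.ofList [Char.ofNat n]) := by
  decide

-- both ports read only name[0]
lemma get_corner_head (c : Char) (rest : List Char) :
    get_corner (String.ofList (c :: rest)) = get_corner (String.ofList [c]) := by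
  simp [get_corner]

lemma get_corner_alt_head (c : Char) (rest : List Char) :
    get_corner_alt (String.ofList (c :: rest)) = get_corner_alt (String.ofList [c]) := by
  simp [get_corner_alt]

-- ===== VERDICT (by name: the statement is the Claim_ definition above) =====
theorem get_corner_spec : Claim_equal_get_corner := by
  intro name hdom hpre
  unfold Spec_get_corner
  cases hlist : name.toList with
  | nil =>
      exact absurd (by simpa using congrArg String.ofList hlist) hpre
  | cons c rest =>
      have hname : name = String.ofList (c :: rest) := by
        simpa using (congrArg String.ofList hlist)
      have hc : pvDomChar c = true := by
        have := hdom
        unfold Dom_get_corner pvDomStr at this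
        rw [hlist] at this
        simp [List.all_cons] at this
        exact this.1
      have hlt : c.toNat < 128 := by
        simp [pvDomChar] at hc
        omega
      have := char_agree c.toNat hlt
      rw [Char.ofNat_toNat] at this
      rw [hname, get_corner_head, get_corner_alt_head, this]
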